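-- pv_equiv track=rewrite | github.com/Clichong/CTR | utils/feature_deal.py | build_feature_index
-- ===== SOURCE A (Python) =====
-- from collections import OrderedDict
--
-- VARLEN_SPARSE_MAXLEN = 5
--
-- def build_feature_index(sparse_columns, varlen_sparse_columns):
--
--     features = OrderedDict()
--     start = 0
--
--     # 依次对稀疏数据与变长数据进行处理
--     for feat in sparse_columns:
--         features[feat] = (start, start + 1)
--         start += 1
--     for feat in varlen_sparse_columns:
--         features[feat] = (start, start + VARLEN_SPARSE_MAXLEN)
--         start += VARLEN_SPARSE_MAXLEN
--
--     return features
-- ===== SOURCE B (Python) =====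
-- from collections import OrderedDict
--
-- VARLEN_SPARSE_MAXLEN = 5
--
-- def build_feature_index(sparse_columns, varlen_sparse_columns):
--     # Divide and conquer: build each half's interval table independently
--     # (relative to the half's own start), then merge by shifting the right
--     # half's intervals by the left half's total width. No running counter.
--     chain = [(f, 1) for f in sparse_columns] + \
--             [(f, VARLEN_SPARSE_MAXLEN) for f in varlen_sparse_columns]
--
--     def rec(seg):
--         # returns (pairs with intervals relative to the segment start, total width)
--         if not seg:
--             return [], 0
--         if len(seg) == 1:
--             f, w = seg[0]
--             return [(f, (0, w))], w
--         mid = len(seg) // 2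
--         left, wl = rec(seg[:mid])
--         right, wr = rec(seg[mid:])
--         left.extend((k, (a + wl, b + wl)) for k, (a, b) in right)
--         return left, wl + wr
--
--     pairs, _ = rec(chain)
--     return OrderedDict(pairs)
-- ===== Notes on version B (the rewrite author's own statement) =====
-- stated objective: alternative
-- what changed: B replaces A's single forward pass with a mutating counter by a divide-and-conquer recursion over the chained (feature, width) sequence: each half's interval table is built relative to its own start and the two tables are merged by shifting the right half's intervals by the left half's total width, with one final OrderedDict construction.
import Mathlib
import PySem

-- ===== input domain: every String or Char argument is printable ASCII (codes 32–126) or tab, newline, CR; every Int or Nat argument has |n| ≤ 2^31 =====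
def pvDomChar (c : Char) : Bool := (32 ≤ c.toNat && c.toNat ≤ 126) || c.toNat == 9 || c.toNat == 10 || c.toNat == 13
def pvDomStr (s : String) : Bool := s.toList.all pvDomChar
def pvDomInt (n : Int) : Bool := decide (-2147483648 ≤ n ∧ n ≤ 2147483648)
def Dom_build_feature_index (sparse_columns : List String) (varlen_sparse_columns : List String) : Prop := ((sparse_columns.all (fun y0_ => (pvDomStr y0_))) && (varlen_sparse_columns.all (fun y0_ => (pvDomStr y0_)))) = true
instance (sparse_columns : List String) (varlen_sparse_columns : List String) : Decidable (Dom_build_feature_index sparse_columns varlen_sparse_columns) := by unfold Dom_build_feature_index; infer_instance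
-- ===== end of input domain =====

-- B builds the interval table by divide and conquer over the chained (feature, width) sequence:
-- each half is built relative to its own start and the right half is shifted by the left half's
-- total width at the merge; no running counter. Objective: alternative.

-- ===== PORT A =====
def build_feature_index (sparse_columns : List String) (varlen_sparse_columns : List String) : List (String × Int × Int) :=
  -- features = OrderedDict(); start = 0; two for-loops mutating (features, start)
  let st1 := sparse_columns.foldl
    (fun (acc : PySem.Dict String (Int × Int) × Int) feat =>
      (acc.1.insert feat (acc.2, acc.2 + 1), acc.2 + 1))
    (PySem.Dict.empty, 0)
  let st2 := varlen_sparse_columns.foldl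
    (fun (acc : PySem.Dict String (Int × Int) × Int) feat =>
      (acc.1.insert feat (acc.2, acc.2 + 5), acc.2 + 5))
    st1
  st2.1.items

-- ===== PORT B =====
-- def rec(seg): divide and conquer, merging by shifting the right half by the left half's width
-- (fuel = seg.length bounds the recursion depth so the definition is structural; the 0-fuel
-- branch is unreachable when fuel ≥ seg.length)
def bRec : Nat → List (String × Int) → List (String × Int × Int) × Int
  | _, [] => ([], (0 : Int))
  | _, [p] => ([(p.1, ((0 : Int), p.2))], p.2)
  | 0, _ => ([], (0 : Int))
  | fuel + 1, p :: q :: rest =>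
    let mid := (p :: q :: rest).length / 2
    let L := bRec fuel ((p :: q :: rest).take mid)
    let R := bRec fuel ((p :: q :: rest).drop mid)
    (L.1 ++ R.1.map (fun t => (t.1, (t.2.1 + L.2, t.2.2 + L.2))), L.2 + R.2)

def build_feature_index_alt (sparse_columns : List String) (varlen_sparse_columns : List String) : List (String × Int × Int) :=
  -- chain = [(f,1) for f in sparse] + [(f,5) for f in varlen]
  let chain : List (String × Int) :=
    sparse_columns.map (fun f => (f, (1 : Int))) ++ varlen_sparse_columns.map (fun f => (f, (5 : Int)))
  -- pairs, _ = rec(chain); return OrderedDict(pairs)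
  (PySem.Dict.ofList (bRec chain.length chain).1).items

-- ===== PRECONDITION & SPEC =====
def Spec_build_feature_index (sparse_columns : List String) (varlen_sparse_columns : List String) (out : List (String × Int × Int)) : Prop := out = build_feature_index_alt sparse_columns varlen_sparse_columns
instance (sparse_columns : List String) (varlen_sparse_columns : List String) (out : List (String × Int × Int)) : Decidable (Spec_build_feature_index sparse_columns varlen_sparse_columns out) := by unfold Spec_build_feature_index; infer_instance

-- ===== CLAIM (what is proved, stated in full; the proofs are below) =====
def Claim_equal_build_feature_index : Prop := ∀ (sparse_columns : List String) (varlen_sparse_columns : List String), Dom_build_feature_index sparse_columns varlen_sparse_columns → Spec_build_feature_index sparse_columns varlen_sparse_columns (build_feature_index sparse_columns varlen_sparse_columns)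

-- ===== LEMMAS AND PROOFS =====

-- the one-step suffix recurrence (proof abbreviation) and total width of a (feature, width) chain
def bStep (acc : List (String × Int × Int)) (p : String × Int) : List (String × Int × Int) :=
  (p.1, ((0 : Int), p.2)) :: acc.map (fun q => (q.1, (q.2.1 + p.2, q.2.2 + p.2)))

def chainW (seg : List (String × Int)) : Int := (seg.map (fun p => p.2)).sum

-- folding the suffix recurrence onto a nonempty init appends the init shifted by the chain's width
theorem foldr_step_init (seg : List (String × Int)) (init : List (String × Int × Int)) :
    seg.foldr (fun p acc => bStep acc p) init
    = seg.foldr (fun p acc => bStep acc p) []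
      ++ init.map (fun q => (q.1, (q.2.1 + chainW seg, q.2.2 + chainW seg))) := by
  induction seg with
  | nil => simp [chainW]
  | cons p t ih =>
    simp only [List.foldr_cons]
    rw [ih]
    simp only [bStep, chainW, List.map_cons, List.sum_cons, List.map_append, List.map_map,
      List.cons_append]
    congr 2
    apply List.map_congr_left
    intro q _
    simp only [Function.comp_apply, Prod.mk.injEq, true_and]
    omega

-- the divide-and-conquer recursion computes exactly the suffix recurrence and the total width
theorem bRec_eq (fuel : Nat) (seg : List (String × Int)) (hf : seg.length ≤ fuel) :
    bRec fuel seg = (seg.foldr (fun p acc => bStep acc p) [], chainW seg) := by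
  induction fuel generalizing seg with
  | zero =>
    match seg, hf with
    | [], _ => simp [bRec, chainW]
  | succ f ih =>
    match seg with
    | [] => simp [bRec, chainW]
    | [p] => simp [bRec, chainW, bStep]
    | p :: q :: rest =>
      rw [bRec]
      have hlen : (p :: q :: rest).length = rest.length + 2 := by simp
      have htake : ((p :: q :: rest).take ((p :: q :: rest).length / 2)).length ≤ f := by
        simp only [List.length_take, hlen] at *
        omega
      have hdrop : ((p :: q :: rest).drop ((p :: q :: rest).length / 2)).length ≤ f := by
        simp only [List.length_drop, hlen] at *
        omega
      rw [ih _ htake, ih _ hdrop]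
      have hsplit := List.take_append_drop ((p :: q :: rest).length / 2) (p :: q :: rest)
      refine Prod.ext ?_ ?_
      · conv_rhs => rw [← hsplit, List.foldr_append, foldr_step_init]
      · conv_rhs => rw [← hsplit]
        simp [chainW]


-- enumerate with a shifted start is a map over enumerate
theorem enumerate_shift {α : Type} (l : List α) (s : Int) :
    PySem.List.enumerate l (s + 1) = (PySem.List.enumerate l s).map (fun p => (p.1 + 1, p.2)) := by
  induction l generalizing s with
  | nil => simp [PySem.List.enumerate_nil]
  | cons a t ih => simp [PySem.List.enumerate_cons, ih]

theorem enumerate_one {α : Type} (l : List α) :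
    PySem.List.enumerate l 1 = (PySem.List.enumerate l).map (fun p => (p.1 + 1, p.2)) := by
  have h := enumerate_shift l 0
  norm_num at h
  exact h

-- A's first loop inserts the closed-form width-1 pairs; the counter ends at c + len
theorem loop1_eq (l : List String) (d : PySem.Dict String (Int × Int)) (c : Int) :
    l.foldl (fun (acc : PySem.Dict String (Int × Int) × Int) feat =>
        (acc.1.insert feat (acc.2, acc.2 + 1), acc.2 + 1)) (d, c)
    = (((PySem.List.enumerate l).map (fun p => (p.2, (c + p.1, c + p.1 + 1)))).foldl
        (fun d p => d.insert p.1 p.2) d, c + l.length) := by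
  induction l generalizing d c with
  | nil => simp [PySem.List.enumerate_nil]
  | cons a t ih =>
    simp only [List.foldl_cons, PySem.List.enumerate_cons, List.map_cons, zero_add]
    rw [ih, enumerate_one t, List.map_map]
    have hm : List.map ((fun (p : Int × String) => (p.2, (c + p.1, c + p.1 + 1))) ∘
          fun p => (p.1 + 1, p.2)) (PySem.List.enumerate t)
        = List.map (fun (p : Int × String) => (p.2, (c + 1 + p.1, c + 1 + p.1 + 1)))
            (PySem.List.enumerate t) := by
      apply List.map_congr_left
      intro p _
      simp only [Function.comp_apply, Prod.mk.injEq, true_and]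
      omega
    rw [hm]
    simp only [Prod.mk.injEq]
    refine ⟨by norm_num, by simp only [List.length_cons]; push_cast; ring⟩

-- A's second loop inserts the closed-form width-5 pairs; the counter ends at c + 5*len
theorem loop5_eq (l : List String) (d : PySem.Dict String (Int × Int)) (c : Int) :
    l.foldl (fun (acc : PySem.Dict String (Int × Int) × Int) feat =>
        (acc.1.insert feat (acc.2, acc.2 + 5), acc.2 + 5)) (d, c)
    = (((PySem.List.enumerate l).map (fun p => (p.2, (c + 5 * p.1, c + 5 * (p.1 + 1))))).foldl
        (fun d p => d.insert p.1 p.2) d, c + 5 * l.length) := by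
  induction l generalizing d c with
  | nil => simp [PySem.List.enumerate_nil]
  | cons a t ih =>
    simp only [List.foldl_cons, PySem.List.enumerate_cons, List.map_cons, zero_add, mul_zero,
      mul_one, add_zero]
    rw [ih, enumerate_one t, List.map_map]
    have hm : List.map ((fun (p : Int × String) => (p.2, (c + 5 * p.1, c + 5 * (p.1 + 1)))) ∘
          fun p => (p.1 + 1, p.2)) (PySem.List.enumerate t)
        = List.map (fun (p : Int × String) => (p.2, (c + 5 + 5 * p.1, c + 5 + 5 * (p.1 + 1))))
            (PySem.List.enumerate t) := by
      apply List.map_congr_left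
      intro p _
      simp only [Function.comp_apply, Prod.mk.injEq, true_and]
      omega
    rw [hm]
    simp only [Prod.mk.injEq]
    refine ⟨by norm_num, by simp only [List.length_cons]; push_cast; ring⟩

theorem ofList_eq_foldl (ps : List (String × Int × Int)) :
    PySem.Dict.ofList ps
    = ps.foldl (fun (d : PySem.Dict String (Int × Int)) p => d.insert p.1 p.2) PySem.Dict.empty := by
  rfl

-- B's suffix recurrence over the width-1 part yields the closed-form pairs, with the
-- leftover init shifted by the part's length
theorem bfold1_eq (s : List String) (init : List (String × Int × Int)) :
    (s.map (fun f => (f, (1 : Int)))).foldr (fun p acc => bStep acc p) init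
    = (PySem.List.enumerate s).map (fun p => (p.2, (p.1, p.1 + 1)))
      ++ init.map (fun q => (q.1, (q.2.1 + (s.length : Int), q.2.2 + (s.length : Int)))) := by
  induction s with
  | nil =>
    simp [PySem.List.enumerate_nil]
  | cons a t ih =>
    simp only [List.map_cons, List.foldr_cons]
    rw [ih]
    simp only [bStep, PySem.List.enumerate_cons, enumerate_one, zero_add, List.map_cons,
      List.map_append, List.map_map]
    congr 1
    congr 1
    all_goals
      apply List.map_congr_left
      intro p _
      simp only [Function.comp_apply, List.length_cons, Prod.mk.injEq, true_and]
      push_cast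
      omega

-- B's suffix recurrence over the width-5 part yields the closed-form pairs
theorem bfold5_eq (v : List String) :
    (v.map (fun f => (f, (5 : Int)))).foldr (fun p acc => bStep acc p) [] 
    = (PySem.List.enumerate v).map (fun p => (p.2, (5 * p.1, 5 * (p.1 + 1)))) := by
  induction v with
  | nil => simp
  | cons a t ih =>
    simp only [List.map_cons, List.foldr_cons]
    rw [ih]
    simp only [bStep, PySem.List.enumerate_cons, enumerate_one, zero_add, List.map_cons,
      List.map_map]
    congr 1
    apply List.map_congr_left
    intro p _
    simp only [Function.comp_apply, Prod.mk.injEq, true_and]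
    omega

-- ===== VERDICT (by name: the statement is the Claim_ definition above) =====
theorem build_feature_index_spec : Claim_equal_build_feature_index := by
  intro s v _
  show build_feature_index s v = build_feature_index_alt s v
  have hB : (bRec (s.map (fun f => (f, (1 : Int))) ++ v.map (fun f => (f, (5 : Int)))).length
          (s.map (fun f => (f, (1 : Int))) ++ v.map (fun f => (f, (5 : Int))))).1
      = (PySem.List.enumerate s).map (fun p => (p.2, (p.1, p.1 + 1)))
        ++ (PySem.List.enumerate v).map
            (fun p => (p.2, (5 * p.1 + (s.length : Int), 5 * (p.1 + 1) + (s.length : Int)))) := by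
    rw [bRec_eq _ _ le_rfl]
    rw [List.foldr_append, bfold5_eq, bfold1_eq, List.map_map]
    refine congrArg₂ _ rfl ?_
    apply List.map_congr_left
    intro p _
    simp only [Function.comp_apply]
  simp only [build_feature_index, build_feature_index_alt, loop1_eq, loop5_eq, ofList_eq_foldl, hB,
    List.foldl_append, zero_add]
  refine congrArg _ (congrArg₂ _ (congrArg₂ _ rfl ?_) ?_)
  · apply List.map_congr_left; intro p _; simp
  · apply List.map_congr_left
    intro p _
    simp only [Prod.mk.injEq, true_and]
    omega
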